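-- pv_equiv track=rewrite | github.com/ValeriosTheod/Draw_A_Card | script.py | draw_card
-- ===== SOURCE A (Python) =====
-- def draw_card(deck, num_cards):
--   hand = []
--   for _ in range(num_cards):
--     if deck:
--       hand.append(deck.pop())
--     else:
--       break
--   return hand, deck
-- ===== SOURCE B (Python) =====
-- def draw_card(deck, num_cards):
--   # Closed-form count + slice and bulk delete instead of a pop loop; mutates deck in place like A.
--   n = max(0, min(num_cards, len(deck)))
--   cut = len(deck) - n
--   hand = deck[cut:][::-1]
--   del deck[cut:]
--   return hand, deck
-- ===== Notes on version B (the rewrite author's own statement) =====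
-- stated objective: simpler
-- what changed: Replaces the pop-one-card-per-iteration loop with a closed-form draw count n = max(0, min(num_cards, len(deck))) followed by one reversed slice and one bulk delete.
import Mathlib
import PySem

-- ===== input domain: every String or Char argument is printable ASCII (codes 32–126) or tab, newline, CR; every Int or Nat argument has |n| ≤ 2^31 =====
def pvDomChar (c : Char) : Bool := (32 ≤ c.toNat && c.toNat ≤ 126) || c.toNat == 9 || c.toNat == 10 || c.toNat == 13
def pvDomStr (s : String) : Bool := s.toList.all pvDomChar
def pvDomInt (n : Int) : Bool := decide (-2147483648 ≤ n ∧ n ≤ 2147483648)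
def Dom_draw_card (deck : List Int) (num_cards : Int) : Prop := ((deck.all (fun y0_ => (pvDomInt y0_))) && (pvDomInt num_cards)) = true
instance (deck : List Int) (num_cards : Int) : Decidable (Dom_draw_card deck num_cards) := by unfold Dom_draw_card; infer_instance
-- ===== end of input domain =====

-- B replaces A's pop-per-iteration loop by a closed-form count plus one reversed
-- slice and one bulk delete (objective: simpler, loop-free decomposition).
-- Both A and B mutate the argument deck in place identically; the equivalence
-- proved here is about the returned pair.

-- ===== PORT A =====
-- the 'for _ in range(num_cards): if deck: hand.append(deck.pop()) else: break' loop;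
-- fuel = number of remaining iterations of range(num_cards)
def drawLoopA : Nat → List Int → List Int → List Int × List Int
  | 0, hand, deck => (hand, deck)
  | Nat.succ n, hand, deck =>
      if deck.isEmpty then (hand, deck)
      else drawLoopA n (hand ++ [deck.getLast!]) deck.dropLast

def draw_card (deck : List Int) (num_cards : Int) : List Int × List Int :=
  -- range(num_cards) is empty for num_cards ≤ 0, hence toNat
  drawLoopA num_cards.toNat [] deck

-- ===== PORT B =====
def draw_card_alt (deck : List Int) (num_cards : Int) : List Int × List Int :=
  let n : Int := max 0 (min num_cards (deck.length : Int))
  let cut : Nat := deck.length - n.toNat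
  ((deck.drop cut).reverse, deck.take cut)

-- ===== PRECONDITION & SPEC =====
def Spec_draw_card (deck : List Int) (num_cards : Int) (out : List Int × List Int) : Prop := out = draw_card_alt deck num_cards
instance (deck : List Int) (num_cards : Int) (out : List Int × List Int) : Decidable (Spec_draw_card deck num_cards out) := by unfold Spec_draw_card; infer_instance

-- ===== CLAIM (what is proved, stated in full; the proofs are below) =====
def Claim_equal_draw_card : Prop := ∀ (deck : List Int) (num_cards : Int), Dom_draw_card deck num_cards → Spec_draw_card deck num_cards (draw_card deck num_cards)

-- ===== LEMMAS AND PROOFS =====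

-- loop invariant: A's loop with `fuel` iterations left pops exactly min fuel |deck| cards
theorem drawLoopA_eq (fuel : Nat) : ∀ (deck hand : List Int),
    drawLoopA fuel hand deck =
      (hand ++ (deck.drop (deck.length - min fuel deck.length)).reverse,
       deck.take (deck.length - min fuel deck.length)) := by
  induction fuel with
  | zero =>
      intro deck hand
      simp [drawLoopA]
  | succ n ih =>
      intro deck hand
      rcases List.eq_nil_or_concat deck with h | ⟨ys, y, h⟩
      · subst h; simp [drawLoopA]
      · subst h
        simp only [List.concat_eq_append]
        have hne : (ys ++ [y]).isEmpty = false := by simp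
        rw [drawLoopA, hne]
        simp only [Bool.false_eq_true, if_false]
        rw [show (ys ++ [y]).getLast! = y by induction ys <;> simp_all [List.getLast!], List.dropLast_concat, ih ys (hand ++ [y])]
        have hlen : (ys ++ [y]).length = ys.length + 1 := by simp
        by_cases hc : n ≥ ys.length
        · have h1 : min n ys.length = ys.length := by omega
          have h2 : min (n + 1) (ys ++ [y]).length = ys.length + 1 := by
            rw [hlen]; omega
          rw [h1, h2, hlen]
          simp
        · have h1 : min n ys.length = n := by omega
          have h2 : min (n + 1) (ys ++ [y]).length = n + 1 := by rw [hlen]; omega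
          rw [h1, h2, hlen]
          have h3 : ys.length + 1 - (n + 1) = ys.length - n := by omega
          rw [h3]
          have h4 : ys.length - n ≤ ys.length := by omega
          rw [List.drop_append_of_le_length h4, List.take_append_of_le_length h4]
          simp

theorem toNat_max_min (num_cards : Int) (L : Nat) :
    (max 0 (min num_cards (L : Int))).toNat = min num_cards.toNat L := by
  omega

-- ===== VERDICT (by name: the statement is the Claim_ definition above) =====
theorem draw_card_spec : Claim_equal_draw_card := by
  intro deck num_cards _
  unfold Spec_draw_card draw_card draw_card_alt
  simp only [drawLoopA_eq, toNat_max_min]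
  simp
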